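-- pv_equiv track=rewrite | github.com/takifouhal/swain_cli | swain_cli/generator.py | replace_heap_option
-- ===== SOURCE A (Python) =====
-- from typing import Any, Dict, List, Optional, Sequence, Tuple
--
-- def replace_heap_option(java_opts: Sequence[str], new_heap: str) -> List[str]:
--     replaced = False
--     result: List[str] = []
--     for opt in java_opts:
--         if opt.startswith("-Xmx") and not replaced:
--             result.append(new_heap)
--             replaced = True
--         else:
--             result.append(opt)
--     if not replaced:
--         result.append(new_heap)
--     return result
-- ===== SOURCE B (Python) =====
-- from typing import List, Sequence
--
-- def replace_heap_option(java_opts: Sequence[str], new_heap: str) -> List[str]: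
--     opts = list(java_opts)
--     mask = [o.startswith("-Xmx") for o in opts]
--     if True in mask:
--         i = mask.index(True)
--         return opts[:i] + [new_heap] + opts[i + 1:]
--     return opts + [new_heap]
-- ===== Notes on version B (the rewrite author's own statement) =====
-- stated objective: alternative
-- what changed: B works in stages: it maps the options to a boolean '-Xmx' mask, tests membership of True, and then splices new_heap in by list slicing (or concatenates it at the end), instead of A's single flag-driven accumulator loop.
import Mathlib
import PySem

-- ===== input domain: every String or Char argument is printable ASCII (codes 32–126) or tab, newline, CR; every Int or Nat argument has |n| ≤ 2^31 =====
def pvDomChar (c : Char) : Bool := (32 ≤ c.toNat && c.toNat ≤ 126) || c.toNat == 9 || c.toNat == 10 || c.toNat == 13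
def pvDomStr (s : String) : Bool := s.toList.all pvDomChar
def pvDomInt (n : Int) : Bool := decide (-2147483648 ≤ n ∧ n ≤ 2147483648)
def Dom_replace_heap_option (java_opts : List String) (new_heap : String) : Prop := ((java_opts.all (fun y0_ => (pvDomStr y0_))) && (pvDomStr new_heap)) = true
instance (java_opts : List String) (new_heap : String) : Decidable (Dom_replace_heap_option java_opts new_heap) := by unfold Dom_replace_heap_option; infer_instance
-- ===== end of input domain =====

-- B replaces A's flag-driven accumulator loop by staged passes (a boolean '-Xmx' mask, a membership test, a slice splice); alternative decomposition, same cost.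

-- ===== PORT A =====
-- A's loop body on its state (replaced, result)
def pvStep (nh : String) (s : Bool × List String) (opt : String) : Bool × List String :=
  if PySem.Str.startswith opt "-Xmx" && !s.1 then (true, s.2 ++ [nh]) else (s.1, s.2 ++ [opt])

def replace_heap_option (java_opts : List String) (new_heap : String) : List String :=
  let st := java_opts.foldl (pvStep new_heap) (false, [])
  if !st.1 then st.2 ++ [new_heap] else st.2

-- ===== PORT B =====
-- Slices opts[:i] / opts[i+1:] with nonnegative indices are exactly take/drop;
-- 'True in mask' is mask.contains true, 'mask.index(True)' under that guard is mask.idxOf true.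
def replace_heap_option_alt (java_opts : List String) (new_heap : String) : List String :=
  let mask := java_opts.map (fun o => PySem.Str.startswith o "-Xmx")
  if mask.contains true then
    let i := mask.idxOf true
    java_opts.take i ++ [new_heap] ++ java_opts.drop (i + 1)
  else
    java_opts ++ [new_heap]

-- ===== PRECONDITION & SPEC =====
def Spec_replace_heap_option (java_opts : List String) (new_heap : String) (out : List String) : Prop := out = replace_heap_option_alt java_opts new_heap
instance (java_opts : List String) (new_heap : String) (out : List String) : Decidable (Spec_replace_heap_option java_opts new_heap out) := by unfold Spec_replace_heap_option; infer_instance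

-- ===== CLAIM (what is proved, stated in full; the proofs are below) =====
def Claim_equal_replace_heap_option : Prop := ∀ (java_opts : List String) (new_heap : String), Dom_replace_heap_option java_opts new_heap → Spec_replace_heap_option java_opts new_heap (replace_heap_option java_opts new_heap)

-- ===== LEMMAS AND PROOFS =====

-- once replaced, the loop just copies the rest
theorem pv_fold_true (nh : String) (t : List String) (acc : List String) :
    t.foldl (pvStep nh) (true, acc) = (true, acc ++ t) := by
  induction t generalizing acc with
  | nil => simp
  | cons h t ih => rw [List.foldl_cons]; simp only [pvStep, Bool.not_true, Bool.and_false,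
      Bool.false_eq_true, if_false]; rw [ih]; simp

-- the accumulator is only ever appended to
theorem pv_fold_acc (nh : String) (t : List String) (b : Bool) (acc : List String) :
    t.foldl (pvStep nh) (b, acc) =
      ((t.foldl (pvStep nh) (b, [])).1, acc ++ (t.foldl (pvStep nh) (b, [])).2) := by
  induction t generalizing b acc with
  | nil => simp
  | cons h t ih =>
    rw [List.foldl_cons, List.foldl_cons]
    by_cases hc : (PySem.Str.startswith h "-Xmx" && !b) = true
    · simp only [pvStep, hc, if_true]
      simp only [List.nil_append] at *
      rw [ih true (acc ++ [nh]), ih true [nh]]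
      simp
    · simp only [pvStep, hc, Bool.false_eq_true, if_false]
      simp only [List.nil_append] at *
      rw [ih b (acc ++ [h]), ih b [h]]
      simp

-- A's cons step: matching head replaces in place, otherwise the head is carried over
theorem pv_A_cons (h : String) (t : List String) (nh : String) :
    replace_heap_option (h :: t) nh =
      (if PySem.Str.startswith h "-Xmx" then nh :: t
       else h :: replace_heap_option t nh) := by
  simp only [replace_heap_option, List.foldl_cons]
  by_cases hx : PySem.Str.startswith h "-Xmx" = true
  · simp only [pvStep, hx, Bool.not_false, Bool.and_true, if_true]
    simp only [List.nil_append]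
    rw [pv_fold_true nh t [nh]]
    simp
  · simp only [pvStep, hx, Bool.false_and, Bool.false_eq_true, if_false]
    simp only [List.nil_append]
    rw [pv_fold_acc nh t false [h]]
    cases hb : (t.foldl (pvStep nh) (false, [])).1 <;> simp

-- B's cons step has the same shape
theorem pv_B_cons (h : String) (t : List String) (nh : String) :
    replace_heap_option_alt (h :: t) nh =
      (if PySem.Str.startswith h "-Xmx" then nh :: t
       else h :: replace_heap_option_alt t nh) := by
  by_cases hx : PySem.Str.startswith h "-Xmx" = true
  · simp only [replace_heap_option_alt, List.map_cons, hx, if_true]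
    have h1 : (true :: List.map (fun o => PySem.Str.startswith o "-Xmx") t).contains true
        = true := by rw [List.contains_cons]; rfl
    rw [if_pos h1]
    have h2 : List.idxOf true (true :: List.map (fun o => PySem.Str.startswith o "-Xmx") t)
        = 0 := by simp
    rw [h2]
    rfl
  · have hx' : PySem.Str.startswith h "-Xmx" = false := Bool.eq_false_iff.mpr hx
    simp only [replace_heap_option_alt, List.map_cons, hx', Bool.false_eq_true, if_false]
    by_cases hc : (List.map (fun o => PySem.Str.startswith o "-Xmx") t).contains true = true
    · have h1 : (false :: List.map (fun o => PySem.Str.startswith o "-Xmx") t).contains true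
          = true := by rw [List.contains_cons, hc]; rfl
      rw [if_pos h1, if_pos hc]
      have h2 : List.idxOf true (false :: List.map (fun o => PySem.Str.startswith o "-Xmx") t)
          = List.idxOf true (List.map (fun o => PySem.Str.startswith o "-Xmx") t) + 1 := by
        rw [List.idxOf_cons]; rfl
      rw [h2]
      simp [List.take_succ_cons, List.drop_succ_cons]
    · have hc' : (List.map (fun o => PySem.Str.startswith o "-Xmx") t).contains true = false :=
        Bool.eq_false_iff.mpr hc
      have h1 : (false :: List.map (fun o => PySem.Str.startswith o "-Xmx") t).contains true
          = false := by rw [List.contains_cons, hc']; rfl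
      rw [if_neg (by rw [h1]; exact Bool.false_ne_true), if_neg hc]
      rfl

theorem pv_main (l : List String) (nh : String) :
    replace_heap_option l nh = replace_heap_option_alt l nh := by
  induction l with
  | nil => rfl
  | cons h t ih =>
    rw [pv_A_cons, pv_B_cons, ih]

-- ===== VERDICT (by name: the statement is the Claim_ definition above) =====
theorem replace_heap_option_spec : Claim_equal_replace_heap_option := by
  intro l nh _
  exact pv_main l nh
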